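-- pv_equiv track=rewrite | github.com/vladofilipovic/SGI_Python | EserciziAggiuntivi/03-recnici/regioni.py | StatistikaUDrzavi3
-- ===== SOURCE A (Python) =====
-- def StatistikaUDrzavi3(gradovi):
--     risultato = {}
--     pomocna = {}
--     for drzava in gradovi.keys():
--         dizGradovi = gradovi[drzava]
--         for grad in dizGradovi.keys():
--             teritorija = dizGradovi[grad][0]
--             populacija = dizGradovi[grad][1]
--             valore = pomocna.get(drzava, [0, [], []])
--             valore[0] = valore[0] + populacija
--             valore[1] = valore[1] + [grad]
--             if teritorija not in valore[2]:
--                 valore[2] = valore[2] + [teritorija]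
--             pomocna[drzava] = valore
--     for drzava in pomocna.keys():
--         ukupnaPopulacija = pomocna[drzava][0]
--         listaGradova = pomocna[drzava][1]
--         listaTeritorija = pomocna[drzava][2]
--         risultato[drzava] = (ukupnaPopulacija, len(listaGradova), len(listaTeritorija))
--     return risultato
-- ===== SOURCE B (Python) =====
-- def StatistikaUDrzavi3(gradovi):
--     # Flatten to one list of (country, territory, population) records, then run
--     # independent flat passes (population sum, city count, distinct-pair count)
--     # joined at the end; countries without cities never produce a record, so
--     # they are omitted exactly as in the original.
--     records = [(d, v[0], v[1]) for d, dg in gradovi.items() for v in dg.values()]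
--     pop = {}
--     for d, _, p in records:
--         pop[d] = pop.get(d, 0) + p
--     cnt = {}
--     for d, _, _ in records:
--         cnt[d] = cnt.get(d, 0) + 1
--     pairs = list(dict.fromkeys((d, t) for d, t, _ in records))
--     nt = {}
--     for d, _ in pairs:
--         nt[d] = nt.get(d, 0) + 1
--     return {d: (pop[d], cnt[d], nt[d]) for d in pop}
-- ===== Notes on version B (the rewrite author's own statement) =====
-- stated objective: alternative
-- what changed: Replaces A's fused per-country accumulator pass (a mutable [population, city-list, territory-list] record updated city by city, then a second conversion pass) with a flatten into one (country, territory, population) record list followed by independent staged passes - a population-sum dict, a city-count dict, and a count over the deduplicated (country, territory) pair list - joined at the end over the first dict's keys.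
import Mathlib
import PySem

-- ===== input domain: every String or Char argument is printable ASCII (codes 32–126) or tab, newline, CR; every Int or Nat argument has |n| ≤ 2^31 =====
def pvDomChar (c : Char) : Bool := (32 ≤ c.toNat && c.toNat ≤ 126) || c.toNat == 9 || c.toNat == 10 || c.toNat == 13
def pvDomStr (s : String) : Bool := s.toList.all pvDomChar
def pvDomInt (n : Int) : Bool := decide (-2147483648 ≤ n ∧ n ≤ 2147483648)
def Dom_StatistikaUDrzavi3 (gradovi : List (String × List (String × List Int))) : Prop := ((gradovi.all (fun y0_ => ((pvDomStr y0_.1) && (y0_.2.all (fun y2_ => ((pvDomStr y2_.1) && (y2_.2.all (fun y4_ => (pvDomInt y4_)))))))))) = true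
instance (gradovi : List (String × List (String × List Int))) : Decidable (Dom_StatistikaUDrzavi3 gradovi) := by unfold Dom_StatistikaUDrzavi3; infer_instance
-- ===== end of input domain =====

-- B replaces A's fused accumulator pass + conversion pass by a flatten into one record
-- list followed by independent staged passes (population sum, city count, distinct
-- (country, territory)-pair count) joined at the end; objective: alternative.


-- ===== PORT A =====
-- Literal port of A. `gradovi` / the inner dicts are association lists with unique keys
-- (Pre_ below): Python's `for k in d.keys(): … d[k] …` is then exactly iteration over the
-- pairs. `dizGradovi[grad][0]` / `[1]` are pyGetD; Pre_ guarantees the index is in range,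
-- so the default is never used.
def StatistikaUDrzavi3 (gradovi : List (String × List (String × List Int))) : List (String × Int × Int × Int) :=
  let pomocna : PySem.Dict String (Int × List String × List Int) :=
    gradovi.foldl (fun pom entry =>
      entry.2.foldl (fun pom city =>
        let teritorija := PySem.List.pyGetD city.2 0 0
        let populacija := PySem.List.pyGetD city.2 1 0
        let valore := pom.getD entry.1 (0, [], [])
        pom.insert entry.1
          (valore.1 + populacija,
           valore.2.1 ++ [city.1],
           if teritorija ∈ valore.2.2 then valore.2.2 else valore.2.2 ++ [teritorija])) pom)
      PySem.Dict.empty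
  let risultato : PySem.Dict String (Int × Int × Int) :=
    pomocna.items.foldl (fun ris p =>
      ris.insert p.1 (p.2.1, (p.2.2.1.length : Int), (p.2.2.2.length : Int)))
      PySem.Dict.empty
  risultato.items

-- ===== PORT B =====
-- Literal port of B: flatten to records, three staged dict passes, final join over
-- pop's keys. `dict.fromkeys` dedup is PySem.List.dedup; the lookups pop[d]/cnt[d]/nt[d]
-- in the final comprehension are ported as getD — d ranges over pop's keys, and every
-- country with a record is a key of all three dicts, so the default is unreachable.
def StatistikaUDrzavi3_alt (gradovi : List (String × List (String × List Int))) : List (String × Int × Int × Int) :=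
  let records : List (String × Int × Int) :=
    gradovi.flatMap (fun p => p.2.map (fun c => (p.1, PySem.List.pyGetD c.2 0 0, PySem.List.pyGetD c.2 1 0)))
  let pop : PySem.Dict String Int :=
    records.foldl (fun d r => d.insert r.1 (d.getD r.1 0 + r.2.2)) PySem.Dict.empty
  let cnt : PySem.Dict String Int :=
    records.foldl (fun d r => d.insert r.1 (d.getD r.1 0 + 1)) PySem.Dict.empty
  let pairs : List (String × Int) := PySem.List.dedup (records.map (fun r => (r.1, r.2.1)))
  let nt : PySem.Dict String Int :=
    pairs.foldl (fun d r => d.insert r.1 (d.getD r.1 0 + 1)) PySem.Dict.empty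
  (pop.keys.foldl (fun ris d => ris.insert d (pop.getD d 0, cnt.getD d 0, nt.getD d 0))
    PySem.Dict.empty).items

-- ===== PRECONDITION & SPEC =====
-- Pre_ excludes (a) association lists with duplicate country keys or duplicate city keys
-- inside a country — those do not represent any Python dict — and (b) city value lists of
-- length < 2, on which A (and B) raise IndexError at dizGradovi[grad][0]/[1].
def Pre_StatistikaUDrzavi3 (gradovi : List (String × List (String × List Int))) : Prop :=
  (gradovi.map Prod.fst).Nodup ∧
  ∀ p ∈ gradovi, (p.2.map Prod.fst).Nodup ∧ ∀ c ∈ p.2, 2 ≤ c.2.length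
instance (gradovi : List (String × List (String × List Int))) : Decidable (Pre_StatistikaUDrzavi3 gradovi) := by unfold Pre_StatistikaUDrzavi3; infer_instance

def pvWitness_StatistikaUDrzavi3 : (List (String × List (String × List Int))) :=
  [("rs", [("bg", [1, 1000]), ("ns", [1, 300])]), ("it", []), ("fr", [("pa", [2, 900])])]

def Spec_StatistikaUDrzavi3 (gradovi : List (String × List (String × List Int))) (out : List (String × Int × Int × Int)) : Prop := out = StatistikaUDrzavi3_alt gradovi
instance (gradovi : List (String × List (String × List Int))) (out : List (String × Int × Int × Int)) : Decidable (Spec_StatistikaUDrzavi3 gradovi out) := by unfold Spec_StatistikaUDrzavi3; infer_instance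

-- ===== CLAIM (what is proved, stated in full; the proofs are below) =====
def Claim_equal_StatistikaUDrzavi3 : Prop := ∀ (gradovi : List (String × List (String × List Int))), Dom_StatistikaUDrzavi3 gradovi → Pre_StatistikaUDrzavi3 gradovi → Spec_StatistikaUDrzavi3 gradovi (StatistikaUDrzavi3 gradovi)

-- ===== LEMMAS AND PROOFS =====

-- Both ports are proved equal to this canonical per-country list: for each country with
-- at least one city, in order, (name, population sum, city count, distinct territories).
def pvCanon (gradovi : List (String × List (String × List Int))) : List (String × Int × Int × Int) :=
  (gradovi.filter (fun p => !p.2.isEmpty)).map (fun p =>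
    (p.1,
     (p.2.map (fun c => PySem.List.pyGetD c.2 1 0)).sum,
     (p.2.length : Int),
     ((PySem.Set.ofList (p.2.map (fun c => PySem.List.pyGetD c.2 0 0))).length : Int)))

-- ---------- A side ----------

-- A's per-city accumulator update (the body of A's inner loop, factored for the proofs).
def pvStep (v : Int × List String × List Int) (city : String × List Int) : Int × List String × List Int :=
  (v.1 + PySem.List.pyGetD city.2 1 0,
   v.2.1 ++ [city.1],
   if PySem.List.pyGetD city.2 0 0 ∈ v.2.2 then v.2.2 else v.2.2 ++ [PySem.List.pyGetD city.2 0 0])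

-- Port A written with pvStep (definitional unfolding of the lets).
lemma pvPortA_unfold (gs : List (String × List (String × List Int))) :
    StatistikaUDrzavi3 gs =
      ((gs.foldl (fun pom entry => entry.2.foldl
          (fun pom city => pom.insert entry.1 (pvStep (pom.getD entry.1 (0, [], [])) city)) pom)
          PySem.Dict.empty).items.foldl
        (fun ris p => ris.insert p.1 (p.2.1, (p.2.2.1.length : Int), (p.2.2.2.length : Int)))
        PySem.Dict.empty).items := rfl

-- A's accumulator over one country's cities, computed componentwise.
lemma pvAgg (g : List (String × List Int)) : ∀ (v : Int × List String × List Int),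
    g.foldl pvStep v =
      (v.1 + (g.map (fun c => PySem.List.pyGetD c.2 1 0)).sum,
       v.2.1 ++ g.map (fun c => c.1),
       (g.map (fun c => PySem.List.pyGetD c.2 0 0)).foldl PySem.Set.add v.2.2) := by
  induction g with
  | nil => intro v; simp
  | cons c g ih =>
    intro v
    simp only [List.foldl_cons, ih, List.map_cons, List.sum_cons, pvStep,
      PySem.Set.add, PySem.Set.contains]
    refine Prod.ext (by simp; ring) (Prod.ext (by simp) (by simp))

-- A's inner loop over a nonempty country keeps updating one key of pomocna.
lemma pvInner (d : String) (g : List (String × List Int)) :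
    ∀ (pom : PySem.Dict String (Int × List String × List Int)), g ≠ [] →
    g.foldl (fun pom city => pom.insert d (pvStep (pom.getD d (0, [], [])) city)) pom
      = pom.insert d (g.foldl pvStep (pom.getD d (0, [], []))) := by
  induction g with
  | nil => intro pom h; exact absurd rfl h
  | cons c g ih =>
    intro pom _
    simp only [List.foldl_cons]
    rcases eq_or_ne g [] with rfl | hg
    · simp
    · rw [ih _ hg, PySem.Dict.getD_insert_self, PySem.Dict.insert_insert_self]

-- A's outer loop: with distinct, fresh country keys, pomocna's items append one entry per
-- country with at least one city, valued by the accumulator fold.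
lemma pvOuter : ∀ (gs : List (String × List (String × List Int)))
    (pom : PySem.Dict String (Int × List String × List Int)),
    pom.keys.Nodup → (∀ p ∈ gs, pom.contains p.1 = false) → (gs.map Prod.fst).Nodup →
    (gs.foldl (fun pom entry => entry.2.foldl
        (fun pom city => pom.insert entry.1 (pvStep (pom.getD entry.1 (0, [], [])) city)) pom) pom).items
      = pom.items ++ (gs.filter (fun p => !p.2.isEmpty)).map
          (fun p => (p.1, p.2.foldl pvStep (0, [], []))) := by
  intro gs
  induction gs with
  | nil => intro pom _ _ _; simp
  | cons e gs ih =>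
    intro pom hnd hfresh hkeys
    have hfe : pom.contains e.1 = false := hfresh e (List.mem_cons_self)
    simp only [List.foldl_cons]
    rcases eq_or_ne e.2 [] with he | he
    · rw [he]
      simp only [List.foldl_nil, List.filter_cons, he, List.isEmpty_nil, Bool.not_true]
      exact ih pom hnd (fun p hp => hfresh p (List.mem_cons_of_mem _ hp))
        (List.Nodup.of_cons hkeys)
    · rw [pvInner e.1 e.2 pom he, PySem.Dict.getD_of_not_contains pom _ hfe]
      have hmem : e.1 ∉ pom.keys := by
        intro h
        rw [(PySem.Dict.contains_iff_mem_keys pom e.1).mpr h] at hfe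
        simp at hfe
      have hnd' : (pom.insert e.1 (e.2.foldl pvStep (0, [], []))).keys.Nodup := by
        rw [PySem.Dict.keys_insert_of_not_contains _ _ hfe]
        simpa using List.Nodup.append hnd (List.nodup_singleton _)
          (by simpa using hmem)
      have hfresh' : ∀ p ∈ gs, (pom.insert e.1 (e.2.foldl pvStep (0, [], []))).contains p.1 = false := by
        intro p hp
        rw [PySem.Dict.contains_insert]
        have hne : p.1 ≠ e.1 := by
          intro h
          exact ((List.nodup_cons.mp hkeys).1) (h ▸ List.mem_map_of_mem hp)
        simp [hne, hfresh p (List.mem_cons_of_mem _ hp)]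
      rw [ih _ hnd' hfresh' (List.Nodup.of_cons hkeys),
        PySem.Dict.items_insert_of_not_contains pom _ hfe]
      simp [he]

-- A equals the canonical list.
lemma pvA_canon (gs : List (String × List (String × List Int)))
    (hpre : (gs.map Prod.fst).Nodup) : StatistikaUDrzavi3 gs = pvCanon gs := by
  rw [pvPortA_unfold,
    pvOuter gs PySem.Dict.empty PySem.Dict.nodup_keys_empty
      (fun p _ => PySem.Dict.contains_empty _) hpre]
  set L := (gs.filter (fun p => !p.2.isEmpty)).map (fun p => (p.1, p.2.foldl pvStep (0, [], []))) with hL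
  have hLnd : (L.map Prod.fst).Nodup := by
    rw [hL, List.map_map]
    have : (List.map (Prod.fst ∘ fun p => (p.1, p.2.foldl pvStep (0, [], [])))
        (gs.filter (fun p => !p.2.isEmpty))).Sublist (gs.map Prod.fst) :=
      List.Sublist.map _ List.filter_sublist
    exact hpre.sublist (by simpa using this)
  rw [show (PySem.Dict.empty : PySem.Dict String (Int × List String × List Int)).items = [] from rfl,
    List.nil_append]
  rw [PySem.Dict.items_foldl_insert_fresh L Prod.fst
    (fun p => (p.2.1, (p.2.2.1.length : Int), (p.2.2.2.length : Int)))
    PySem.Dict.empty (fun a _ => PySem.Dict.contains_empty _) hLnd]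
  rw [hL, List.map_map]
  rw [show (PySem.Dict.empty : PySem.Dict String (Int × Int × Int)).items = [] from rfl, List.nil_append]
  unfold pvCanon
  refine List.map_congr_left (fun p hp => ?_)
  simp only [Function.comp, pvAgg p.2 (0, [], []), zero_add, List.nil_append,
    List.length_map]
  simp [PySem.Set.ofList_eq_foldl]

-- ---------- B side ----------

-- One sum-grouping lemma covers all three passes (cnt and nt take weight 1): the lookup
-- at k after the fold is the initial value plus the weights of the records keyed k.
lemma pvGetD_sum {σ : Type} (w : String × σ → Int) :
    ∀ (l : List (String × σ)) (d : PySem.Dict String Int) (k : String),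
    (l.foldl (fun d r => d.insert r.1 (d.getD r.1 0 + w r)) d).getD k 0
      = d.getD k 0 + ((l.filter (fun r => r.1 == k)).map w).sum := by
  intro l
  induction l with
  | nil => intro d k; simp
  | cons r l ih =>
    intro d k
    simp only [List.foldl_cons, ih, List.filter_cons]
    by_cases h : r.1 = k
    · simp [h, PySem.Dict.getD_insert_self]; ring
    · have hne : k ≠ r.1 := fun hh => h hh.symm
      rw [PySem.Dict.getD_insert_of_ne _ _ 0 hne]
      simp [h]

-- Restricting the flattened record list to one country's key recovers that country's block.
lemma pvFilterFlat {ρ : Type} (key : ρ → String) (blk : (String × List (String × List Int)) → List ρ) :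
    ∀ (gs : List (String × List (String × List Int))) (p : String × List (String × List Int)),
    (gs.map Prod.fst).Nodup → p ∈ gs → (∀ q ∈ gs, ∀ r ∈ blk q, key r = q.1) →
    (gs.flatMap blk).filter (fun r => key r == p.1) = blk p := by
  intro gs
  induction gs with
  | nil => intro p _ hp _; cases hp
  | cons q gs ih =>
    intro p hnd hp hkey
    simp only [List.flatMap_cons, List.filter_append]
    rcases List.mem_cons.mp hp with rfl | hp'
    · have h1 : (blk p).filter (fun r => key r == p.1) = blk p :=
        List.filter_eq_self.mpr (fun r hr => by
          simp [hkey p List.mem_cons_self r hr])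
      have h2 : (gs.flatMap blk).filter (fun r => key r == p.1) = [] := by
        refine List.filter_eq_nil_iff.mpr (fun r hr => ?_)
        obtain ⟨q', hq', hr'⟩ := List.mem_flatMap.mp hr
        have hk := hkey q' (List.mem_cons_of_mem _ hq') r hr'
        have hne : q'.1 ≠ p.1 := by
          intro hh
          exact (List.nodup_cons.mp hnd).1 (hh ▸ List.mem_map_of_mem hq')
        simp [hk, hne]
      rw [h1, h2, List.append_nil]
    · have hq : q.1 ≠ p.1 := by
        intro hh
        exact (List.nodup_cons.mp hnd).1 (hh ▸ List.mem_map_of_mem hp')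
      have h1 : (blk q).filter (fun r => key r == p.1) = [] := by
        refine List.filter_eq_nil_iff.mpr (fun r hr => ?_)
        simp [hkey q List.mem_cons_self r hr, hq]
      rw [h1, List.nil_append]
      exact ih p (List.Nodup.of_cons hnd) hp' (fun q' h => hkey q' (List.mem_cons_of_mem _ h))

-- Deduplicating the flattened list deduplicates each country's block independently
-- (blocks of distinct countries are element-disjoint).
lemma pvOfListFlat {ρ : Type} [BEq ρ] [LawfulBEq ρ] (key : ρ → String) (blk : (String × List (String × List Int)) → List ρ) :
    ∀ (gs : List (String × List (String × List Int))),
    (gs.map Prod.fst).Nodup → (∀ q ∈ gs, ∀ r ∈ blk q, key r = q.1) →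
    PySem.Set.ofList (gs.flatMap blk) = gs.flatMap (fun q => PySem.Set.ofList (blk q)) := by
  intro gs
  induction gs with
  | nil => intro _ _; simp
  | cons q gs ih =>
    intro hnd hkey
    simp only [List.flatMap_cons]
    rw [PySem.Set.ofList_append, PySem.Set.update_eq_append_filter]
    rw [ih (List.Nodup.of_cons hnd) (fun q' h => hkey q' (List.mem_cons_of_mem _ h))]
    congr 1
    refine List.filter_eq_self.mpr (fun r hr => ?_)
    have hr' : r ∈ gs.flatMap blk := by
      obtain ⟨q', hq', hr'⟩ := List.mem_flatMap.mp hr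
      exact List.mem_flatMap.mpr ⟨q', hq', (PySem.Set.mem_ofList _ _).mp hr'⟩
    obtain ⟨q', hq', hrq'⟩ := List.mem_flatMap.mp hr'
    have hne : q'.1 ≠ q.1 := by
      intro hh
      exact (List.nodup_cons.mp hnd).1 (hh ▸ List.mem_map_of_mem hq')
    have hnotmem : r ∉ PySem.Set.ofList (blk q) := by
      intro hmem
      exact hne ((hkey q' (List.mem_cons_of_mem _ hq') r hrq').symm.trans
        (hkey q List.mem_cons_self r ((PySem.Set.mem_ofList _ _).mp hmem)))
    simp only [Bool.not_eq_true']
    rw [← Bool.not_eq_true, PySem.Set.contains_iff]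
    exact hnotmem

-- Tagging with a fixed country commutes with dedup.
lemma pvOfListPair (d : String) (ts : List Int) :
    PySem.Set.ofList (ts.map (fun t => (d, t))) = (PySem.Set.ofList ts).map (fun t => (d, t)) := by
  induction ts using List.reverseRecOn with
  | nil => simp
  | append_singleton ts t ih =>
    rw [List.map_append, List.map_singleton, PySem.Set.ofList_append_singleton,
      PySem.Set.ofList_append_singleton, ih, PySem.Set.add_eq_ite, PySem.Set.add_eq_ite]
    by_cases h : t ∈ PySem.Set.ofList ts
    · simp [h, List.mem_map.mpr ⟨t, h, rfl⟩]
    · have : (d, t) ∉ (PySem.Set.ofList ts).map (fun t => (d, t)) := by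
        intro hm
        obtain ⟨t', ht', he⟩ := List.mem_map.mp hm
        cases he
        exact h ht'
      simp [h, this]

-- A constant block dedups to one element.
lemma pvOfListConst {α β : Type} [BEq β] [LawfulBEq β] (l : List α) (a : β) (h : l ≠ []) :
    PySem.Set.ofList (l.map (fun _ => a)) = [a] := by
  obtain ⟨x, l', rfl⟩ := List.exists_cons_of_ne_nil h
  rw [List.map_cons, PySem.Set.ofList_cons]
  have : PySem.Set.discard (PySem.Set.ofList (l'.map (fun _ => a))) a = [] := by
    refine List.eq_nil_iff_forall_not_mem.mpr (fun y hy => ?_)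
    have := (PySem.Set.mem_discard _ _ _).mp hy
    obtain ⟨hy1, hy2⟩ := this
    obtain ⟨_, _, rfl⟩ := List.mem_map.mp ((PySem.Set.mem_ofList _ _).mp hy1)
    exact hy2 rfl
  rw [this]

-- Weight-1 instance of the grouping lemma, stated separately for direct rewriting.
lemma pvGetD_cnt {σ : Type} :
    ∀ (l : List (String × σ)) (d : PySem.Dict String Int) (k : String),
    (l.foldl (fun d r => d.insert r.1 (d.getD r.1 0 + 1)) d).getD k 0
      = d.getD k 0 + ((l.filter (fun r => r.1 == k)).length : Int) := by
  intro l
  induction l with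
  | nil => intro d k; simp
  | cons r l ih =>
    intro d k
    simp only [List.foldl_cons, ih, List.filter_cons]
    by_cases h : r.1 = k
    · simp [h, PySem.Dict.getD_insert_self]; ring
    · have hne : k ≠ r.1 := fun hh => h hh.symm
      rw [PySem.Dict.getD_insert_of_ne _ _ 0 hne]
      simp [h]

-- Collapsed key blocks list the city-bearing countries in order.
lemma pvFlatIf : ∀ (gs : List (String × List (String × List Int))),
    (gs.flatMap (fun q => if q.2.isEmpty = true then ([] : List String) else [q.1]))
      = (gs.filter (fun p => !p.2.isEmpty)).map Prod.fst := by
  intro gs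
  induction gs with
  | nil => simp
  | cons q gs ih =>
    simp only [List.flatMap_cons, List.filter_cons, ih]
    by_cases h : q.2.isEmpty
    · simp [h]
    · simp [h]

-- B-side record blocks (one country's flattened records / (country, territory) pairs).
def pvRblk (p : String × List (String × List Int)) : List (String × Int × Int) :=
  p.2.map (fun c => (p.1, PySem.List.pyGetD c.2 0 0, PySem.List.pyGetD c.2 1 0))

def pvPblk (p : String × List (String × List Int)) : List (String × Int) :=
  p.2.map (fun c => (p.1, PySem.List.pyGetD c.2 0 0))

-- Port B written let-free with pvRblk (definitional unfolding of the lets).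
lemma pvPortB_unfold (gs : List (String × List (String × List Int))) :
    StatistikaUDrzavi3_alt gs =
      (((gs.flatMap pvRblk).foldl (fun d r => d.insert r.1 (d.getD r.1 0 + r.2.2)) PySem.Dict.empty).keys.foldl
        (fun ris k => ris.insert k
          (((gs.flatMap pvRblk).foldl (fun d r => d.insert r.1 (d.getD r.1 0 + r.2.2)) PySem.Dict.empty).getD k 0,
           ((gs.flatMap pvRblk).foldl (fun d r => d.insert r.1 (d.getD r.1 0 + 1)) PySem.Dict.empty).getD k 0,
           ((PySem.List.dedup ((gs.flatMap pvRblk).map (fun r => (r.1, r.2.1)))).foldl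
              (fun d r => d.insert r.1 (d.getD r.1 0 + 1)) PySem.Dict.empty).getD k 0))
        PySem.Dict.empty).items := rfl

-- B equals the canonical list.
lemma pvB_canon (gs : List (String × List (String × List Int)))
    (hpre : (gs.map Prod.fst).Nodup) : StatistikaUDrzavi3_alt gs = pvCanon gs := by
  have hkeyR : ∀ q ∈ gs, ∀ r ∈ pvRblk q, r.1 = q.1 := by
    intro q _ r hr
    obtain ⟨c, _, rfl⟩ := List.mem_map.mp hr
    rfl
  have hkeyP : ∀ q ∈ gs, ∀ r ∈ PySem.Set.ofList (pvPblk q), r.1 = q.1 := by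
    intro q _ r hr
    obtain ⟨c, _, rfl⟩ := List.mem_map.mp ((PySem.Set.mem_ofList _ _).mp hr)
    rfl
  -- the keys of the first pass: city-bearing countries in order
  have hkeys : ((gs.flatMap pvRblk).foldl (fun d r => d.insert r.1 (d.getD r.1 0 + r.2.2))
      PySem.Dict.empty).keys = (gs.filter (fun p => !p.2.isEmpty)).map Prod.fst := by
    rw [PySem.Dict.keys_foldl_insert_key (gs.flatMap pvRblk) (fun r => r.1)
        (fun d r => d.getD r.1 0 + r.2.2) PySem.Dict.empty,
      show (PySem.Dict.empty : PySem.Dict String Int).keys = [] from rfl,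
      PySem.Set.update_nil_left, List.map_flatMap]
    rw [List.flatMap_congr (g := fun q => q.2.map (fun _ => q.1))
      (fun q _ => by simp only [pvRblk, List.map_map]; rfl)]
    rw [pvOfListFlat (fun s => s) (fun q => q.2.map (fun _ => q.1)) gs hpre
      (fun q _ r hr => by obtain ⟨c, _, rfl⟩ := List.mem_map.mp hr; rfl)]
    rw [List.flatMap_congr (g := fun q => if q.2.isEmpty = true then ([] : List String) else [q.1])
      (fun q _ => by
        by_cases h : q.2.isEmpty
        · simp [List.isEmpty_iff.mp h]
        · rw [pvOfListConst q.2 q.1 (by simpa [List.isEmpty_iff] using h)]; simp [h])]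
    exact pvFlatIf gs
  have hKnd : ((gs.filter (fun p => !p.2.isEmpty)).map Prod.fst).Nodup := by
    have : ((gs.filter (fun p => !p.2.isEmpty)).map Prod.fst).Sublist (gs.map Prod.fst) :=
      List.Sublist.map _ List.filter_sublist
    exact hpre.sublist this
  rw [pvPortB_unfold, hkeys,
    PySem.Dict.items_foldl_insert_fresh _ (fun k => k) _ PySem.Dict.empty
      (fun a _ => PySem.Dict.contains_empty _) (by simpa using hKnd),
    show (PySem.Dict.empty : PySem.Dict String (Int × Int × Int)).items = [] from rfl,
    List.nil_append, List.map_map]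
  unfold pvCanon
  refine List.map_congr_left (fun p hp => ?_)
  have hpmem : p ∈ gs := (List.mem_filter.mp hp).1
  have hpne : p.2 ≠ [] := by
    have := (List.mem_filter.mp hp).2
    simpa [List.isEmpty_iff] using this
  have hfilR : (gs.flatMap pvRblk).filter (fun r => r.1 == p.1) = pvRblk p :=
    pvFilterFlat (fun r => r.1) pvRblk gs p hpre hpmem hkeyR
  simp only [Function.comp]
  congr 1
  refine Prod.ext ?_ (Prod.ext ?_ ?_)
  -- population sum
  · rw [pvGetD_sum (fun r => r.2.2) (gs.flatMap pvRblk) PySem.Dict.empty p.1, hfilR]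
    simp [pvRblk, List.map_map]
    rfl
  -- city count
  · rw [pvGetD_cnt (gs.flatMap pvRblk) PySem.Dict.empty p.1, hfilR]
    simp [pvRblk]
  -- distinct territories
  · rw [PySem.List.dedup_eq_ofList, List.map_flatMap,
      List.flatMap_congr (g := pvPblk) (fun q _ => by simp only [pvRblk, pvPblk, List.map_map]; rfl),
      pvOfListFlat (fun r => r.1) pvPblk gs hpre
        (fun q _ r hr => by obtain ⟨c, _, rfl⟩ := List.mem_map.mp hr; rfl),
      pvGetD_cnt (gs.flatMap (fun q => PySem.Set.ofList (pvPblk q))) PySem.Dict.empty p.1,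
      pvFilterFlat (fun r => r.1) (fun q => PySem.Set.ofList (pvPblk q)) gs p hpre hpmem hkeyP]
    have : pvPblk p = (p.2.map (fun c => PySem.List.pyGetD c.2 0 0)).map (fun t => (p.1, t)) := by
      simp [pvPblk, List.map_map]
    rw [this, pvOfListPair, List.length_map]
    simp

-- ===== VERDICT (by name: the statement is the Claim_ definition above) =====
theorem StatistikaUDrzavi3_spec : Claim_equal_StatistikaUDrzavi3 := by
  intro gs _ hpre
  unfold Spec_StatistikaUDrzavi3
  rw [pvA_canon gs hpre.1, pvB_canon gs hpre.1]
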